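-- pv_equiv track=rewrite | github.com/Silverdono/secret-sharing-protocols | ledger/functions.py | computeLagrangeCoeffs
-- ===== SOURCE A (Python) =====
-- def computeLagrangeCoeffs(n, tolerance, l, q, plainShares):
--     # Define proper dimensions
--     t = n - tolerance
--     rows = t
--     cols = l
--     # Initialize Lagrange's coeffs
--     lagrangeCoeffs = [[0] * cols for _ in range(rows)]
--
--     for j in range(cols):
--         for i in range(rows):
--             num = 1
--             den = 1
--             for m in range(t):
--                 if m != i:
--                     tmp = (-j - plainShares[m]) % q
--                     num = (num * tmp) % q
--                     tmp = (plainShares[i] - plainShares[m]) % q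
--                     den = (den * tmp) % q
--             invden = pow(den, -1, q)
--             mu = (num * invden) % q
--             lagrangeCoeffs[i][j] = mu
--
--     return lagrangeCoeffs
-- ===== SOURCE B (Python) =====
-- def computeLagrangeCoeffs(n, tolerance, l, q, plainShares):
--     t = n - tolerance
--     if t <= 0 or l <= 0:
--         return [[0] * l for _ in range(t)]
--     xs = plainShares[:t]
--     # denominator inverse of each row computed once (A recomputes it for every column)
--     invdens = []
--     for i in range(t):
--         d = 1
--         for m in range(t):
--             if m != i:
--                 d = d * ((xs[i] - xs[m]) % q) % q
--         invdens.append(pow(d, -1, q))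
--     # per column: numerators for all rows at once via prefix/suffix products
--     numcols = []
--     for j in range(l):
--         pre = [1]
--         p = 1
--         for x in xs:
--             p = p * ((-j - x) % q) % q
--             pre.append(p)
--         suf = [1]
--         s = 1
--         for x in reversed(xs):
--             s = s * ((-j - x) % q) % q
--             suf.append(s)
--         suf.reverse()
--         numcols.append([pre[i] * suf[i + 1] % q for i in range(t)])
--     return [[numcols[j][i] * invdens[i] % q for j in range(l)] for i in range(t)]
-- ===== Notes on version B (the rewrite author's own statement) =====
-- stated objective: alternative
-- what changed: B hoists the row denominator (and its modular inverse) out of the column loop, computing it once per row instead of once per cell, and replaces the per-cell O(t) numerator loop by per-column prefix/suffix product tables, an O(t^2 + l*t) reorganization of A's O(l*t^2) loop nest (a timing run could not confirm a speedup at its largest sizes, so no speed is claimed).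
-- outside the precondition, e.g. on computeLagrangeCoeffs(1, 0, 2, 7, []): A returns [[1, 1]], B raises IndexError
import Mathlib
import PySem

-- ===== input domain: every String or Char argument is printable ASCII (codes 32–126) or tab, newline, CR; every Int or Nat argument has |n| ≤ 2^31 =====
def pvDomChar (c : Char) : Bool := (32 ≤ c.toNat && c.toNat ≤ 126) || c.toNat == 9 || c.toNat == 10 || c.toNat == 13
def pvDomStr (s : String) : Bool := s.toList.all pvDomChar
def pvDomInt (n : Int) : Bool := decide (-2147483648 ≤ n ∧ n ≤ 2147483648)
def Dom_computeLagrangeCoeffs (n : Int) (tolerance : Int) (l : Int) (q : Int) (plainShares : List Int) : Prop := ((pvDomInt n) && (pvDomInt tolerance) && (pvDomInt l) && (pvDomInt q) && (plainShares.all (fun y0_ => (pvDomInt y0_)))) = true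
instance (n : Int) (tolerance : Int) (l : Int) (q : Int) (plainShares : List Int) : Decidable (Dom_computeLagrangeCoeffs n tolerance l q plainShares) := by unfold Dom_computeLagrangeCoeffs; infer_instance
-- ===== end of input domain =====

-- B restructures A: the row denominator inverse is computed once per row instead of once per cell,
-- and column numerators come from prefix/suffix product tables instead of a per-cell loop (objective: alternative).


-- shared helper: Python's pow(a, -1, q) (modular inverse via a Bézout coefficient).
-- Exact whenever Int.gcd a q = 1 and q ≠ 0 — elsewhere Python raises, which Pre_ excludes.
def pyInvMod (a q : Int) : Int := PySem.Int.mod (Int.gcdA a q) q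

-- ===== PORT A =====
-- body of A's innermost work for cell (i, j): the num/den loop over m, pow, and mu
def pvMuA (q : Int) (plainShares : List Int) (t : Int) (i j : Int) : Int :=
  let nd := (PySem.List.pyRange 0 t 1).foldl (fun (nd : Int × Int) m =>
    if m ≠ i then
      let tmp := PySem.Int.mod (-j - PySem.List.pyGetD plainShares m 0) q
      let num := PySem.Int.mod (nd.1 * tmp) q
      let tmp2 := PySem.Int.mod (PySem.List.pyGetD plainShares i 0 - PySem.List.pyGetD plainShares m 0) q
      let den := PySem.Int.mod (nd.2 * tmp2) q
      (num, den)
    else nd) (1, 1)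
  let invden := pyInvMod nd.2 q
  PySem.Int.mod (nd.1 * invden) q

def computeLagrangeCoeffs (n : Int) (tolerance : Int) (l : Int) (q : Int) (plainShares : List Int) : List (List Int) :=
  let t := n - tolerance
  let rows := t
  let cols := l
  let init : List (List Int) := (PySem.List.pyRange 0 rows 1).map (fun _ => List.replicate cols.toNat 0)
  (PySem.List.pyRange 0 cols 1).foldl (fun lag j =>
    (PySem.List.pyRange 0 rows 1).foldl (fun lag i =>
      PySem.List.pySetD lag i
        (PySem.List.pySetD (PySem.List.pyGetD lag i []) j (pvMuA q plainShares t i j))) lag) init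

-- ===== PORT B =====
def computeLagrangeCoeffs_alt (n : Int) (tolerance : Int) (l : Int) (q : Int) (plainShares : List Int) : List (List Int) :=
  let t := n - tolerance
  if t ≤ 0 ∨ l ≤ 0 then
    (PySem.List.pyRange 0 t 1).map (fun _ => List.replicate l.toNat 0)
  else
    let xs := PySem.List.slice plainShares none (some t)
    let invdens := (PySem.List.pyRange 0 t 1).foldl (fun acc i =>
      let d := (PySem.List.pyRange 0 t 1).foldl (fun d m =>
        if m ≠ i then
          PySem.Int.mod (d * PySem.Int.mod (PySem.List.pyGetD xs i 0 - PySem.List.pyGetD xs m 0) q) q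
        else d) 1
      acc ++ [pyInvMod d q]) []
    let numcols := (PySem.List.pyRange 0 l 1).foldl (fun acc j =>
      let ps := xs.foldl (fun (ps : List Int × Int) x =>
        let p := PySem.Int.mod (ps.2 * PySem.Int.mod (-j - x) q) q
        (ps.1 ++ [p], p)) ([1], 1)
      let ss := xs.reverse.foldl (fun (ss : List Int × Int) x =>
        let s := PySem.Int.mod (ss.2 * PySem.Int.mod (-j - x) q) q
        (ss.1 ++ [s], s)) ([1], 1)
      let suf := ss.1.reverse
      acc ++ [(PySem.List.pyRange 0 t 1).map (fun i =>
        PySem.Int.mod (PySem.List.pyGetD ps.1 i 0 * PySem.List.pyGetD suf (i + 1) 0) q)]) []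
    (PySem.List.pyRange 0 t 1).map (fun i =>
      (PySem.List.pyRange 0 l 1).map (fun j =>
        PySem.Int.mod (PySem.List.pyGetD (PySem.List.pyGetD numcols j []) i 0 * PySem.List.pyGetD invdens i 0) q))

-- ===== PRECONDITION & SPEC =====
-- Pre_ excludes the inputs on which Python A raises (q = 0's ZeroDivisionError, too few shares'
-- IndexError, a non-invertible denominator's ValueError in pow) and, in addition, the degenerate
-- corner t = 1 with an EMPTY share list, where A returns without ever reading a share while B's
-- prefix/suffix tables need t shares and raise IndexError (so: fewer shares than the threshold t
-- is excluded even though A happens to return for t = 1).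
def Pre_computeLagrangeCoeffs (n : Int) (tolerance : Int) (l : Int) (q : Int) (plainShares : List Int) : Prop :=
  (0 < n - tolerance ∧ 0 < l) →
    (q ≠ 0 ∧ n - tolerance ≤ (plainShares.length : Int) ∧
      ∀ i ∈ List.range (n - tolerance).toNat, ∀ m ∈ List.range (n - tolerance).toNat, i ≠ m →
        Int.gcd (plainShares.getD i 0 - plainShares.getD m 0) q = 1)
instance (n : Int) (tolerance : Int) (l : Int) (q : Int) (plainShares : List Int) : Decidable (Pre_computeLagrangeCoeffs n tolerance l q plainShares) := by unfold Pre_computeLagrangeCoeffs; infer_instance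

def pvWitness_computeLagrangeCoeffs : Int × Int × Int × Int × List Int := (3, 1, 2, 7, [1, 2])

def Spec_computeLagrangeCoeffs (n : Int) (tolerance : Int) (l : Int) (q : Int) (plainShares : List Int) (out : List (List Int)) : Prop := out = computeLagrangeCoeffs_alt n tolerance l q plainShares
instance (n : Int) (tolerance : Int) (l : Int) (q : Int) (plainShares : List Int) (out : List (List Int)) : Decidable (Spec_computeLagrangeCoeffs n tolerance l q plainShares out) := by unfold Spec_computeLagrangeCoeffs; infer_instance

-- ===== CLAIM (what is proved, stated in full; the proofs are below) =====
def Claim_equal_computeLagrangeCoeffs : Prop := ∀ (n : Int) (tolerance : Int) (l : Int) (q : Int) (plainShares : List Int), Dom_computeLagrangeCoeffs n tolerance l q plainShares → Pre_computeLagrangeCoeffs n tolerance l q plainShares → Spec_computeLagrangeCoeffs n tolerance l q plainShares (computeLagrangeCoeffs n tolerance l q plainShares)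

-- ===== LEMMAS AND PROOFS =====

-- floor-mod respects congruence
theorem pymod_dvd_sub (a q : Int) : q ∣ a - PySem.Int.mod a q :=
  ⟨PySem.Int.floordiv a q, by have := PySem.Int.floordiv_mul_add_mod a q; ring_nf; linarith⟩

theorem pymod_modEq (a q : Int) : Int.ModEq q (PySem.Int.mod a q) a := by
  rw [Int.modEq_iff_dvd]
  have := pymod_dvd_sub a q
  omega

theorem pymod_congr {a b q : Int} (hq : q ≠ 0) (h : Int.ModEq q a b) :
    PySem.Int.mod a q = PySem.Int.mod b q := by
  have h1 : Int.ModEq q (PySem.Int.mod a q) (PySem.Int.mod b q) :=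
    ((pymod_modEq a q).trans h).trans (pymod_modEq b q).symm
  rw [Int.modEq_iff_dvd] at h1
  have h2 : |q| ∣ PySem.Int.mod b q - PySem.Int.mod a q := (abs_dvd _ _).2 h1
  have h3 : PySem.Int.mod b q - PySem.Int.mod a q = 0 := by
    apply Int.eq_zero_of_abs_lt_dvd h2
    rcases lt_or_gt_of_ne hq with hneg | hpos
    · have b1 := PySem.Int.mod_neg_bounds (a := a) hneg
      have b2 := PySem.Int.mod_neg_bounds (a := b) hneg
      rw [abs_of_neg hneg] at *
      cases abs_cases (PySem.Int.mod b q - PySem.Int.mod a q) <;> omega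
    · have b1 := PySem.Int.mod_nonneg (a := a) hpos
      have b2 := PySem.Int.mod_lt (a := a) hpos
      have b3 := PySem.Int.mod_nonneg (a := b) hpos
      have b4 := PySem.Int.mod_lt (a := b) hpos
      rw [abs_of_pos hpos]
      cases abs_cases (PySem.Int.mod b q - PySem.Int.mod a q) <;> omega
  omega

-- a fold of modular multiplications is the product, modulo q
theorem modfold {α : Type} (q : Int) (g : α → Int) :
    ∀ (L : List α) (a : Int),
      Int.ModEq q (L.foldl (fun acc x => PySem.Int.mod (acc * g x) q) a) (a * (L.map g).prod)
  | [], a => by simp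
  | x :: L, a => by
    simp only [List.foldl_cons, List.map_cons, List.prod_cons]
    have ih := modfold q g L (PySem.Int.mod (a * g x) q)
    have h1 : Int.ModEq q (PySem.Int.mod (a * g x) q * (L.map g).prod) (a * g x * (L.map g).prod) :=
      (pymod_modEq (a * g x) q).mul_right _
    exact (ih.trans h1).trans (by rw [mul_assoc])

-- the skipping fold of A (and of B's denominator loop) is the product with index i left out
theorem skipfold (q t i : Int) (g : Int → Int) (hi0 : 0 ≤ i) (hit : i < t) :
    Int.ModEq q
      ((PySem.List.pyRange 0 t 1).foldl
        (fun acc m => if m ≠ i then PySem.Int.mod (acc * g m) q else acc) 1)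
      (((PySem.List.pyRange 0 i 1).map g).prod * ((PySem.List.pyRange (i + 1) t 1).map g).prod) := by
  rw [PySem.List.pyRange_one_append 0 i t hi0 (by omega),
      PySem.List.pyRange_one_cons hit, List.foldl_append, List.foldl_cons]
  rw [if_neg (by simp)]
  have congl : ((PySem.List.pyRange 0 i 1).foldl
      (fun acc m => if m ≠ i then PySem.Int.mod (acc * g m) q else acc) 1)
      = (PySem.List.pyRange 0 i 1).foldl (fun acc m => PySem.Int.mod (acc * g m) q) 1 := by
    apply PySem.List.foldl_congr_mem
    intro acc x hx
    rw [PySem.List.mem_pyRange_one] at hx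
    rw [if_pos (by omega)]
  rw [congl]
  have congr2 : ∀ (init : Int), ((PySem.List.pyRange (i + 1) t 1).foldl
      (fun acc m => if m ≠ i then PySem.Int.mod (acc * g m) q else acc) init)
      = (PySem.List.pyRange (i + 1) t 1).foldl (fun acc m => PySem.Int.mod (acc * g m) q) init := by
    intro init
    apply PySem.List.foldl_congr_mem
    intro acc x hx
    rw [PySem.List.mem_pyRange_one] at hx
    rw [if_pos (by omega)]
  rw [congr2]
  have h1 := modfold q g (PySem.List.pyRange (i + 1) t 1)
    ((PySem.List.pyRange 0 i 1).foldl (fun acc m => PySem.Int.mod (acc * g m) q) 1)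
  have h2 := modfold q g (PySem.List.pyRange 0 i 1) 1
  calc _ ≡ ((PySem.List.pyRange 0 i 1).foldl (fun acc m => PySem.Int.mod (acc * g m) q) 1)
            * ((PySem.List.pyRange (i + 1) t 1).map g).prod [ZMOD q] := h1
    _ ≡ (1 * ((PySem.List.pyRange 0 i 1).map g).prod)
            * ((PySem.List.pyRange (i + 1) t 1).map g).prod [ZMOD q] := h2.mul_right _
    _ = _ := by ring

theorem mapIdx_id {α : Type} (M : List α) : M.mapIdx (fun _ r => r) = M := by
  apply List.ext_getElem <;> simp

theorem colwrite {α : Type} (mu : Int → α) (j : Int) (k : Nat) (M : List (List α)) :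
    (PySem.List.pyRange 0 (k : Int) 1).foldl
      (fun M i => PySem.List.pySetD M i (PySem.List.pySetD (PySem.List.pyGetD M i []) j (mu i))) M
    = M.mapIdx (fun i row => if i < k then PySem.List.pySetD row j (mu (i : Int)) else row) := by
  induction k with
  | zero => simp [PySem.List.pyRange_one_eq_nil, mapIdx_id]
  | succ k ih =>
    rw [show ((k + 1 : Nat) : Int) = (k : Int) + 1 by push_cast; ring,
      PySem.List.pyRange_one_succ_right (by positivity), List.foldl_append, ih]
    simp only [List.foldl_cons, List.foldl_nil]
    apply List.ext_getElem
    · simp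
    intro m h1 h2
    rw [List.length_mapIdx] at h2
    simp only [PySem.List.pySetD_natCast, PySem.List.pyGetD_natCast, List.getElem_set,
      List.getElem_mapIdx]
    by_cases hmk : m = k
    · subst hmk
      simp only [List.getD_eq_getElem?_getD, List.getElem?_mapIdx]
      simp
      rw [List.getElem?_eq_getElem (show m < M.length by omega)]
      simp
    · split_ifs <;> first | rfl | omega

theorem rowwrite {α : Type} (g : Int → α) (k : Nat) (row : List α) :
    (PySem.List.pyRange 0 (k : Int) 1).foldl (fun r j => PySem.List.pySetD r j (g j)) row
    = row.mapIdx (fun j v => if j < k then g (j : Int) else v) := by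
  induction k with
  | zero => simp [PySem.List.pyRange_one_eq_nil, mapIdx_id]
  | succ k ih =>
    rw [show ((k + 1 : Nat) : Int) = (k : Int) + 1 by push_cast; ring,
      PySem.List.pyRange_one_succ_right (by positivity), List.foldl_append, ih]
    simp only [List.foldl_cons, List.foldl_nil]
    apply List.ext_getElem
    · simp
    intro m h1 h2
    rw [List.length_mapIdx] at h2
    simp only [PySem.List.pySetD_natCast, List.getElem_set, List.getElem_mapIdx]
    by_cases hmk : m = k
    · subst hmk; simp
    · split_ifs <;> first | rfl | omega

theorem fold_mapIdx {β : Type} (F : Nat → Int → β → β) :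
    ∀ (js : List Int) (M : List β),
      js.foldl (fun M j => M.mapIdx (fun i row => F i j row)) M
      = M.mapIdx (fun i row => js.foldl (fun row j => F i j row) row)
  | [], M => by simp [mapIdx_id]
  | j :: js, M => by
    simp only [List.foldl_cons]
    rw [fold_mapIdx F js]
    apply List.ext_getElem
    · simp
    intro m h1 h2
    simp [List.getElem_mapIdx]
theorem pyRange_toNat (x : Int) : PySem.List.pyRange 0 x 1 = PySem.List.pyRange 0 (x.toNat : Int) 1 := by
  rcases (by omega : x ≤ 0 ∨ 0 < x) with h | h
  · rw [PySem.List.pyRange_one_eq_nil h, PySem.List.pyRange_one_eq_nil (by omega)]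
  · rw [Int.toNat_of_nonneg (by omega)]

theorem A_char (n tolerance l q : Int) (s : List Int) :
    computeLagrangeCoeffs n tolerance l q s
    = (PySem.List.pyRange 0 (n - tolerance) 1).map (fun i =>
        (PySem.List.pyRange 0 l 1).map (fun j => pvMuA q s (n - tolerance) i j)) := by
  simp only [computeLagrangeCoeffs]
  -- rewrite the inner row loop into a mapIdx (colwrite)
  rw [show PySem.List.pyRange 0 (n - tolerance) 1
      = PySem.List.pyRange 0 (((n - tolerance).toNat : Nat) : Int) 1 from pyRange_toNat _]
  rw [PySem.List.foldl_congr_mem _ _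
      (fun M j => M.mapIdx (fun i row =>
        if i < (n - tolerance).toNat then
          PySem.List.pySetD row j (pvMuA q s (n - tolerance) (i : Int) j) else row)) _
      (fun M j _ => colwrite (fun i => pvMuA q s (n - tolerance) i j) j (n - tolerance).toNat M)]
  rw [fold_mapIdx (fun i j row =>
      if i < (n - tolerance).toNat then
        PySem.List.pySetD row j (pvMuA q s (n - tolerance) (i : Int) j) else row)]
  apply List.ext_getElem
  · simp [PySem.List.length_pyRange_one]
  intro i hi1 hi2
  rw [List.length_mapIdx, List.length_map, PySem.List.length_pyRange_one] at hi1
  simp only [List.getElem_mapIdx, List.getElem_map, PySem.List.getElem_pyRange_one]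
  have hit : i < (n - tolerance).toNat := by omega
  -- the row-level fold: the guard is always true for this i
  rw [PySem.List.foldl_congr_mem _ _
      (fun row j => PySem.List.pySetD row j (pvMuA q s (n - tolerance) (i : Int) j)) _
      (fun row j _ => by rw [if_pos hit])]
  rw [pyRange_toNat l, rowwrite]
  apply List.ext_getElem
  · simp [PySem.List.length_pyRange_one]
    omega
  intro j hj1 hj2
  rw [List.length_mapIdx, List.length_replicate] at hj1
  simp only [List.getElem_mapIdx, List.getElem_map, PySem.List.getElem_pyRange_one,
    List.getElem_replicate]
  rw [if_pos (by omega)]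
  norm_num
theorem scanl_ne_nil {α β : Type} (f : β → α → β) (b : β) (L : List α) :
    List.scanl f b L = b :: (List.scanl f b L).tail := by
  cases L <;> simp [List.scanl_cons]

theorem scanpair (f : Int → Int → Int) :
    ∀ (L : List Int) (acc : List Int) (p : Int),
      (L.foldl (fun (st : List Int × Int) x => (st.1 ++ [f st.2 x], f st.2 x)) (acc, p))
      = (acc ++ (List.scanl f p L).tail, L.foldl f p)
  | [], acc, p => by simp
  | x :: L, acc, p => by
    simp only [List.foldl_cons]
    rw [scanpair f L (acc ++ [f p x]) (f p x), List.scanl_cons]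
    simp only [List.tail_cons]
    rw [List.append_assoc]
    congr 1
    conv_rhs => rw [scanl_ne_nil f (f p x) L]
    simp

-- (pyRange 0 k).map (s[·]) = s.take k, for k ≤ len s
theorem idxmap_take (s : List Int) (k : Nat) (hk : k ≤ s.length) :
    (PySem.List.pyRange 0 (k : Int) 1).map (fun m => PySem.List.pyGetD s m 0) = s.take k := by
  have h := PySem.List.map_pyGetD_pyRange (s.take k) (0 : Int) (a := 0) le_rfl
  rw [PySem.List.len_eq] at h
  rw [List.length_take, min_eq_left hk] at h
  simp only [Int.toNat_zero, List.drop_zero] at h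
  rw [← h]
  apply List.map_congr_left
  intro m hm
  rw [PySem.List.mem_pyRange_one] at hm
  rw [PySem.List.pyGetD_eq_getElem _ _ hm.1 (by push_cast; omega),
      PySem.List.pyGetD_eq_getElem _ _ hm.1 (by rw [List.length_take]; push_cast; omega),
      List.getElem_take]

theorem idxmap_drop (s : List Int) (a : Int) (k : Nat) (ha : 0 ≤ a) (hk : k ≤ s.length) :
    (PySem.List.pyRange a (k : Int) 1).map (fun m => PySem.List.pyGetD s m 0) = (s.take k).drop a.toNat := by
  have h := PySem.List.map_pyGetD_pyRange (s.take k) (0 : Int) (a := a) ha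
  rw [PySem.List.len_eq, List.length_take, min_eq_left hk] at h
  rw [← h]
  apply List.map_congr_left
  intro m hm
  rw [PySem.List.mem_pyRange_one] at hm
  rw [PySem.List.pyGetD_eq_getElem _ _ (by omega) (by push_cast; omega),
      PySem.List.pyGetD_eq_getElem _ _ (by omega) (by rw [List.length_take]; push_cast; omega),
      List.getElem_take]


theorem mu_pointwise (q t : Int) (s : List Int) (i j : Int)
    (hq : q ≠ 0) (hi0 : 0 ≤ i) (hit : i < t) (hlen : t ≤ (s.length : Int)) :
    pvMuA q s t i j
    = PySem.Int.mod
        (PySem.Int.mod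
          (PySem.List.pyGetD
            (List.scanl (fun a x => PySem.Int.mod (a * PySem.Int.mod (-j - x) q) q) 1 (s.take t.toNat)) i 0
           * PySem.List.pyGetD
            ((List.scanl (fun a x => PySem.Int.mod (a * PySem.Int.mod (-j - x) q) q) 1 (s.take t.toNat).reverse).reverse) (i + 1) 0) q
         * pyInvMod ((PySem.List.pyRange 0 t 1).foldl (fun d m =>
              if m ≠ i then
                PySem.Int.mod (d * PySem.Int.mod (PySem.List.pyGetD (s.take t.toNat) i 0 - PySem.List.pyGetD (s.take t.toNat) m 0) q) q
              else d) 1) q) q := by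
  set t' := t.toNat with ht'
  set i' := i.toNat with hi'
  have hti : (t : Int) = (t' : Int) := by omega
  have hii : (i : Int) = (i' : Int) := by omega
  have hien : i' < t' := by omega
  have htlen : t' ≤ s.length := by omega
  set xs := s.take t' with hxs
  have hxlen : xs.length = t' := by rw [hxs, List.length_take]; omega
  set gx : Int → Int := (fun x => PySem.Int.mod (-j - x) q) with hgx
  set f : Int → Int → Int := (fun a x => PySem.Int.mod (a * gx x) q) with hf
  set g : Int → Int := (fun m => PySem.Int.mod (-j - PySem.List.pyGetD s m 0) q) with hg
  set w : Int → Int := (fun m => PySem.Int.mod (PySem.List.pyGetD s i 0 - PySem.List.pyGetD s m 0) q) with hw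
  -- A's cell as two independent folds
  have hA : pvMuA q s t i j
      = PySem.Int.mod
          (((PySem.List.pyRange 0 t 1).foldl (fun a m => if m ≠ i then PySem.Int.mod (a * g m) q else a) 1)
           * pyInvMod ((PySem.List.pyRange 0 t 1).foldl (fun a m => if m ≠ i then PySem.Int.mod (a * w m) q else a) 1) q) q := by
    simp only [pvMuA]
    rw [PySem.List.foldl_congr_mem _ _
        (fun (nd : Int × Int) m =>
          ((fun a m => if m ≠ i then PySem.Int.mod (a * g m) q else a) nd.1 m,
           (fun a m => if m ≠ i then PySem.Int.mod (a * w m) q else a) nd.2 m)) _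
        (by intro nd m _; by_cases hmi : m ≠ i <;> simp [hmi, hg, hw])]
    rw [PySem.List.foldl_prod_mk
      (f := fun a m => if m ≠ i then PySem.Int.mod (a * g m) q else a)
      (g := fun a m => if m ≠ i then PySem.Int.mod (a * w m) q else a)]
  rw [hA]
  -- B's denominator fold equals A's
  have hden : ((PySem.List.pyRange 0 t 1).foldl (fun d m =>
        if m ≠ i then
          PySem.Int.mod (d * PySem.Int.mod (PySem.List.pyGetD xs i 0 - PySem.List.pyGetD xs m 0) q) q
        else d) 1)
      = ((PySem.List.pyRange 0 t 1).foldl (fun a m => if m ≠ i then PySem.Int.mod (a * w m) q else a) 1) := by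
    apply PySem.List.foldl_congr_mem
    intro acc m hm
    rw [PySem.List.mem_pyRange_one] at hm
    by_cases hmi : m ≠ i
    · rw [if_pos hmi, if_pos hmi]
      simp only [hw]
      rw [PySem.List.pyGetD_eq_getElem xs 0 hm.1 (by rw [hxlen]; omega),
          PySem.List.pyGetD_eq_getElem xs 0 hi0 (by rw [hxlen]; omega),
          PySem.List.pyGetD_eq_getElem s 0 hm.1 (by omega),
          PySem.List.pyGetD_eq_getElem s 0 hi0 (by omega)]
      simp [hxs, List.getElem_take]
    · rw [if_neg hmi, if_neg hmi]
  rw [hden]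
  -- the prefix entry
  have hpre : PySem.List.pyGetD (List.scanl f 1 xs) i 0 = (s.take i').foldl f 1 := by
    rw [PySem.List.pyGetD_eq_getElem _ _ hi0 (by rw [List.length_scanl, hxlen]; push_cast; omega),
        List.getElem_scanl]
    rw [← hi', hxs, List.take_take, min_eq_left (by omega)]
  -- the suffix entry
  have hsuf : PySem.List.pyGetD (List.scanl f 1 xs.reverse).reverse (i + 1) 0
      = ((xs.drop (i' + 1)).reverse).foldl f 1 := by
    rw [PySem.List.pyGetD_eq_getElem _ _ (by omega)
        (by rw [List.length_reverse, List.length_scanl, List.length_reverse, hxlen]; push_cast; omega)]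
    rw [List.getElem_reverse, List.getElem_scanl]
    congr 1
    rw [List.take_reverse]
    congr 2
    simp [hxlen]
    omega
  rw [hpre, hsuf]
  -- index lists and value lists
  have hPL : (PySem.List.pyRange 0 i 1).map g = (s.take i').map gx := by
    rw [hg]
    have : (fun m => PySem.Int.mod (-j - PySem.List.pyGetD s m 0) q)
        = gx ∘ (fun m => PySem.List.pyGetD s m 0) := by funext m; simp [hgx]
    rw [this, ← List.map_map, hii, idxmap_take s i' (by omega)]
  have hPR : (PySem.List.pyRange (i + 1) t 1).map g = (xs.drop (i' + 1)).map gx := by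
    rw [hg]
    have : (fun m => PySem.Int.mod (-j - PySem.List.pyGetD s m 0) q)
        = gx ∘ (fun m => PySem.List.pyGetD s m 0) := by funext m; simp [hgx]
    rw [this, ← List.map_map, hti, idxmap_drop s (i + 1) t' (by omega) (by omega)]
    rw [show ((i : Int) + 1).toNat = i' + 1 by omega, ← hxs]
  -- congruences
  have hnumA := skipfold q t i g hi0 hit
  rw [hPL, hPR] at hnumA
  have hpre2 := modfold q gx (s.take i') 1
  have hsuf2 := modfold q gx ((xs.drop (i' + 1)).reverse) 1
  rw [List.map_reverse, List.prod_reverse] at hsuf2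
  apply pymod_congr hq
  apply Int.ModEq.mul_right
  refine hnumA.trans ?_
  have : Int.ModEq q ((s.take i').foldl f 1 * (xs.drop (i' + 1)).reverse.foldl f 1)
      (((s.take i').map gx).prod * ((xs.drop (i' + 1)).map gx).prod) := by
    have := (hpre2.mul hsuf2)
    simpa using this
  exact ((pymod_modEq _ q).trans this).symm

-- ===== VERDICT =====
theorem computeLagrangeCoeffs_spec : Claim_equal_computeLagrangeCoeffs := by
  intro n tolerance l q s hdom hpre
  unfold Spec_computeLagrangeCoeffs
  rw [A_char]
  simp only [computeLagrangeCoeffs_alt]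
  by_cases hdeg : n - tolerance ≤ 0 ∨ l ≤ 0
  · rw [if_pos hdeg]
    rcases hdeg with h | h
    · rw [PySem.List.pyRange_one_eq_nil h]
      simp
    · apply List.map_congr_left
      intro i _
      rw [PySem.List.pyRange_one_eq_nil h, show l.toNat = 0 by omega]
      simp
  · rw [if_neg hdeg]
    push_neg at hdeg
    obtain ⟨hq, hlen, _⟩ := hpre ⟨by omega, by omega⟩
    rw [PySem.List.slice_to s (by omega)]
    rw [PySem.List.foldl_append_singleton_eq_map, List.nil_append]
    rw [PySem.List.foldl_append_singleton_eq_map, List.nil_append]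
    apply List.map_congr_left
    intro i hi
    rw [PySem.List.mem_pyRange_one] at hi
    apply List.map_congr_left
    intro j hj
    rw [PySem.List.mem_pyRange_one] at hj
    rw [PySem.List.pyGetD_map_pyRange_of_nonneg _ _ _ _ hj.1 hj.2,
        PySem.List.pyGetD_map_pyRange_of_nonneg _ _ _ _ hi.1 hi.2]
    rw [scanpair (fun p x => PySem.Int.mod (p * PySem.Int.mod (-j - x) q) q),
        scanpair (fun p x => PySem.Int.mod (p * PySem.Int.mod (-j - x) q) q)]
    simp only []
    simp only [List.singleton_append]
    rw [← scanl_ne_nil, ← scanl_ne_nil]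
    rw [PySem.List.pyGetD_map_pyRange_of_nonneg _ _ _ _ hi.1 hi.2]
    exact mu_pointwise q (n - tolerance) s i j hq hi.1 hi.2 hlen
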